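-- pv_equiv track=rewrite | github.com/codyc-xyz/leet-code | dynamic_programming/problems/2110_number_of_smooth_descent_periods_of_a_stock.py | getDescentPeriods
-- ===== SOURCE A (Python) =====
-- from typing import List
--
-- def getDescentPeriods(prices: List[int]) -> int:
--     ans = len(prices)
--     for i in range(len(prices)):
--         prev = prices[i]
--         for j in range(i+1, len(prices)):
--             if prices[j] == prev - 1:
--                 ans += 1
--                 prev = prices[j]
--             else:
--                 break
--     return ans
-- ===== SOURCE B (Python) =====
-- from typing import List
--
-- def getDescentPeriods(prices: List[int]) -> int:
--     # Linear DP: run = length of the smooth descent run ending here; sum the runs.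
--     if not prices:
--         return 0
--     ans = run = 1
--     prev = prices[0]
--     for x in prices[1:]:
--         run = run + 1 if x == prev - 1 else 1
--         ans += run
--         prev = x
--     return ans
-- ===== Notes on version B (the rewrite author's own statement) =====
-- stated objective: faster
-- what changed: Replace the quadratic nested scan (for each start index, walk forward while prices drop by 1) with a single linear pass that maintains the length of the descent run ending at the current element and sums those run lengths.
import Mathlib
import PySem

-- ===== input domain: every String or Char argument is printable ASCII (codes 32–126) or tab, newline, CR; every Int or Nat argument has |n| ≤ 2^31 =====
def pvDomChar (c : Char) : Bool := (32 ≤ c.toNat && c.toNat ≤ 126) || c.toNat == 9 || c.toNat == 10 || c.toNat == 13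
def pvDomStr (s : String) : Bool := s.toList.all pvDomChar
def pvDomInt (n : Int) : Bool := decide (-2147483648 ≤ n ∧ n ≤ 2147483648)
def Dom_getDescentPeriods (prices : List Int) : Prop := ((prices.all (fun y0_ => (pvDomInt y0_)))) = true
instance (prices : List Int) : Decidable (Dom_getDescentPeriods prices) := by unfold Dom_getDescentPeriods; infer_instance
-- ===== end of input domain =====

-- B replaces A's quadratic start-index scan with a linear run-length DP pass (faster, asymptotic).


-- ===== PORT A =====
-- inner loop: walk forward from position i while each price is previous-1, counting extensions (break otherwise)
def pvInnerA (prev : Int) : List Int → Int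
  | [] => 0
  | x :: xs => if x = prev - 1 then 1 + pvInnerA x xs else 0

-- outer loop over every start index i: prev = prices[i], inner walk over the suffix after i
def pvOuterA : List Int → Int
  | [] => 0
  | p :: rest => pvInnerA p rest + pvOuterA rest

def getDescentPeriods (prices : List Int) : Int :=
  (prices.length : Int) + pvOuterA prices

-- ===== PORT B =====
-- single pass carrying (ans, run, prev): run = length of descent run ending at current element
def pvLoopB (ans run prev : Int) : List Int → Int
  | [] => ans
  | x :: xs =>
    let r := if x = prev - 1 then run + 1 else 1
    pvLoopB (ans + r) r x xs

def getDescentPeriods_alt (prices : List Int) : Int :=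
  match prices with
  | [] => 0
  | x :: xs => pvLoopB 1 1 x xs

-- ===== PRECONDITION & SPEC =====
def Spec_getDescentPeriods (prices : List Int) (out : Int) : Prop := out = getDescentPeriods_alt prices
instance (prices : List Int) (out : Int) : Decidable (Spec_getDescentPeriods prices out) := by unfold Spec_getDescentPeriods; infer_instance

-- ===== CLAIM (what is proved, stated in full; the proofs are below) =====
def Claim_equal_getDescentPeriods : Prop := ∀ (prices : List Int), Dom_getDescentPeriods prices → Spec_getDescentPeriods prices (getDescentPeriods prices)

-- ===== LEMMAS AND PROOFS =====

-- g run prev xs = total added to ans by B's loop over xs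
def pvG (run prev : Int) : List Int → Int
  | [] => 0
  | x :: xs =>
    let r := if x = prev - 1 then run + 1 else 1
    r + pvG r x xs

theorem pvLoopB_eq_add (xs : List Int) : ∀ ans run prev, pvLoopB ans run prev xs = ans + pvG run prev xs := by
  induction xs with
  | nil => intro ans run prev; simp [pvLoopB, pvG]
  | cons x xs ih =>
    intro ans run prev
    simp only [pvLoopB, pvG]
    rw [ih]
    ring

theorem pvG_shift (xs : List Int) : ∀ run prev, pvG run prev xs = pvG 1 prev xs + (run - 1) * pvInnerA prev xs := by
  induction xs with
  | nil => intro run prev; simp [pvG, pvInnerA]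
  | cons x xs ih =>
    intro run prev
    by_cases h : x = prev - 1
    · subst h
      simp only [pvG, pvInnerA, if_true]
      rw [ih (run + 1), ih (1 + 1)]
      ring
    · simp [pvG, pvInnerA, h]

theorem pvG_eq (xs : List Int) : ∀ prev, pvG 1 prev xs = (xs.length : Int) + pvInnerA prev xs + pvOuterA xs := by
  induction xs with
  | nil => intro prev; simp [pvG, pvInnerA, pvOuterA]
  | cons x xs ih =>
    intro prev
    by_cases h : x = prev - 1
    · subst h
      simp only [pvG, pvInnerA, pvOuterA, List.length_cons, if_true]
      rw [pvG_shift xs (1 + 1) (prev - 1), ih (prev - 1)]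
      push_cast
      ring
    · simp only [pvG, pvInnerA, pvOuterA, List.length_cons, if_neg h]
      rw [ih x]
      push_cast
      ring

-- ===== VERDICT (by name: the statement is the Claim_ definition above) =====
theorem getDescentPeriods_spec : Claim_equal_getDescentPeriods := by
  intro prices _
  unfold Spec_getDescentPeriods
  cases prices with
  | nil => rfl
  | cons x xs =>
    show ((x :: xs).length : Int) + pvOuterA (x :: xs) = pvLoopB 1 1 x xs
    rw [pvLoopB_eq_add, pvG_eq]
    simp only [pvOuterA, List.length_cons]
    push_cast
    ring
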